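-- pv_equiv track=rewrite | github.com/Ackee-Blockchain/wake | woke/testing/coverage.py | _parse_opcodes
-- ===== SOURCE A (Python) =====
-- from typing import Any, Dict, List, Optional, Set, Tuple, Union
--
-- def _parse_opcodes(opcodes: str) -> List[Tuple[int, str, int, Optional[int]]]:
--     pc_op_map = []
--     opcodes_spl = opcodes.split(" ")
--
--     pc = 0
--     ignore = False
--
--     for i, opcode in enumerate(opcodes_spl):
--         if ignore:
--             ignore = False
--             continue
--
--         if not opcode.startswith("PUSH"):
--             pc_op_map.append((pc, opcode, 1, None))
--             pc += 1
--         else: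
--             size = int(opcode[4:]) + 1
--             pc_op_map.append((pc, opcode, size, int(opcodes_spl[i + 1], 16)))
--             pc += size
--             ignore = True
--     return pc_op_map
-- ===== SOURCE B (Python) =====
-- def _parse_opcodes(opcodes):
--     # two passes: first collect (op, size, arg) records consuming PUSH operands,
--     # then assign pc as a running prefix sum and zip.
--     recs = []
--     it = iter(opcodes.split(" "))
--     for op in it:
--         if op.startswith("PUSH"):
--             recs.append((op, int(op[4:]) + 1, int(next(it), 16)))
--         else:
--             recs.append((op, 1, None))
--     pcs = [0]
--     for _, size, _ in recs:
--         pcs.append(pcs[-1] + size)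
--     return [(pc, op, size, arg) for pc, (op, size, arg) in zip(pcs, recs)]
-- ===== Notes on version B (the rewrite author's own statement) =====
-- stated objective: alternative
-- what changed: Replaces A's single enumerate-loop with an ignore flag and tokens[i+1] index lookup by two passes: an iterator pass collecting (op, size, arg) records that consumes each PUSH operand via next(it), then a prefix-sum pass assigning pc and a zip.
import Mathlib
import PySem

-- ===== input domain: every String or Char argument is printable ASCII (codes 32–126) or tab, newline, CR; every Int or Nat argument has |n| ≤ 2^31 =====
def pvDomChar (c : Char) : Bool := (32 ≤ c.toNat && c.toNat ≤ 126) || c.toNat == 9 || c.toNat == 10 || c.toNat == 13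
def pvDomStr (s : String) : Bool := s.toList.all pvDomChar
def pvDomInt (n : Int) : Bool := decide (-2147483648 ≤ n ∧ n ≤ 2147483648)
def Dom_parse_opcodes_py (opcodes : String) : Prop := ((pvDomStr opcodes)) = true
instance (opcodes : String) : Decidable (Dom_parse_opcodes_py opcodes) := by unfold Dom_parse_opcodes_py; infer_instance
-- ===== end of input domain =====

-- B replaces A's single enumerate-loop with ignore flag and index lookup by two passes
-- (collect (op,size,arg) records consuming operands, then zip with a prefix-sum pc list);
-- objective: alternative decomposition, same cost.

-- ===== PORT A =====
-- A's loop: enumerate(tokens) with an `ignore` flag; PUSH reads tokens[i+1] by index and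
-- hex-parses it.  The `_, _` fall-through is exactly where Python raises
-- (ValueError from int(opcode[4:]), IndexError from opcodes_spl[i+1], ValueError from int(…,16)).
def parseAGo (all : List String) : List (Int × String) → Int → Bool → List (Int × String × Int × Option Int)
  | [], _, _ => []
  | (i, op) :: rest, pc, ignore =>
    if ignore then parseAGo all rest pc false
    else if PySem.Str.startswith op "PUSH" then
      match PySem.Int.ofStr? (PySem.Str.slice op (some 4) none),
            (PySem.List.pyGet? all (i + 1)).bind (fun nxt => PySem.Int.ofStrBase? nxt 16) with
      | some n, some v => (pc, op, n + 1, some v) :: parseAGo all rest (pc + (n + 1)) true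
      | _, _ => []  -- Python raises here
    else (pc, op, 1, none) :: parseAGo all rest (pc + 1) false

def parse_opcodes_py (opcodes : String) : List (Int × String × Int × Option Int) :=
  let spl := (PySem.Str.split? opcodes " ").getD []  -- sep " " ≠ "" so split? is always some
  parseAGo spl (PySem.List.enumerate spl 0) 0 false

-- ===== PORT B =====
-- pass 1: records (op, size, arg); a PUSH consumes the following token (next(it));
-- a lone trailing token that is a PUSH, or a failed int parse, is where Python raises.
def recsB : List String → List (String × Int × Option Int)
  | [] => []
  | [op] => if PySem.Str.startswith op "PUSH" then [] else [(op, 1, none)]  -- lone PUSH: Python raises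
  | op :: nxt :: rest =>
    if PySem.Str.startswith op "PUSH" then
      match PySem.Int.ofStr? (PySem.Str.slice op (some 4) none), PySem.Int.ofStrBase? nxt 16 with
      | some n, some v => (op, n + 1, some v) :: recsB rest
      | _, _ => []  -- Python raises here
    else (op, 1, none) :: recsB (nxt :: rest)

-- pass 2: pcs = [0]; for each record append pcs[-1] + size
def pcsB (recs : List (String × Int × Option Int)) : List Int :=
  recs.foldl (fun pcs r => pcs ++ [(PySem.List.pyGet? pcs (-1)).getD 0 + r.2.1]) [0]

def parse_opcodes_py_alt (opcodes : String) : List (Int × String × Int × Option Int) :=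
  let recs := recsB ((PySem.Str.split? opcodes " ").getD [])
  ((pcsB recs).zip recs).map (fun p => (p.1, p.2.1, p.2.2.1, p.2.2.2))

-- ===== PRECONDITION & SPEC =====
-- Pre_ excludes exactly the inputs on which A raises: a PUSH token (in opcode position)
-- without a following operand token, or whose suffix is not int-parsable, or whose operand
-- is not base-16 parsable.  okTokens is the grammar ((non-PUSH) | (PUSH operand))* of the
-- token list — a shape condition on the input; it computes no pc, record or output.
def okTokens : List String → Bool
  | [] => true
  | [op] => !(PySem.Str.startswith op "PUSH")
  | op :: nxt :: rest =>
    if PySem.Str.startswith op "PUSH" then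
      (PySem.Int.ofStr? (PySem.Str.slice op (some 4) none)).isSome
        && (PySem.Int.ofStrBase? nxt 16).isSome && okTokens rest
    else okTokens (nxt :: rest)

def Pre_parse_opcodes_py (opcodes : String) : Prop :=
  okTokens ((PySem.Str.split? opcodes " ").getD []) = true
instance (opcodes : String) : Decidable (Pre_parse_opcodes_py opcodes) := by
  unfold Pre_parse_opcodes_py; infer_instance

def pvWitness_parse_opcodes_py : String := "PUSH1 ff ADD"

def Spec_parse_opcodes_py (opcodes : String) (out : List (Int × String × Int × Option Int)) : Prop := out = parse_opcodes_py_alt opcodes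
instance (opcodes : String) (out : List (Int × String × Int × Option Int)) : Decidable (Spec_parse_opcodes_py opcodes out) := by unfold Spec_parse_opcodes_py; infer_instance

-- ===== CLAIM (what is proved, stated in full; the proofs are below) =====
def Claim_equal_parse_opcodes_py : Prop := ∀ (opcodes : String), Dom_parse_opcodes_py opcodes → Pre_parse_opcodes_py opcodes → Spec_parse_opcodes_py opcodes (parse_opcodes_py opcodes)

-- ===== LEMMAS AND PROOFS =====

-- the common shape both programs compute: records annotated with a running pc
def annotate (pc : Int) : List (String × Int × Option Int) → List (Int × String × Int × Option Int)
  | [] => []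
  | (op, size, arg) :: rs => (pc, op, size, arg) :: annotate (pc + size) rs

theorem drop_cons_tail {α : Type} (all : List α) (k : Nat) (x : α) (xs : List α)
    (h : all.drop k = x :: xs) : all.drop (k + 1) = xs := by
  have := congrArg (List.drop 1) h
  simpa [List.drop_drop, Nat.add_comm] using this

-- single-step unfolding lemmas for A's loop (keep simp from unfolding recursively)
theorem parseAGo_ignore (all : List String) (x : Int × String) (rest : List (Int × String)) (pc : Int) :
    parseAGo all (x :: rest) pc true = parseAGo all rest pc false := by
  obtain ⟨i, op⟩ := x; simp [parseAGo]

theorem parseAGo_nonpush (all : List String) (i : Int) (op : String) (rest : List (Int × String)) (pc : Int)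
    (h : PySem.Str.startswith op "PUSH" = false) :
    parseAGo all ((i, op) :: rest) pc false = (pc, op, 1, none) :: parseAGo all rest (pc + 1) false := by
  simp at h; simp [parseAGo, h]

theorem parseAGo_push (all : List String) (i : Int) (op : String) (rest : List (Int × String)) (pc : Int)
    (n : Int) (nxt : String) (v : Int)
    (h : PySem.Str.startswith op "PUSH" = true)
    (hn : PySem.Int.ofStr? (PySem.Str.slice op (some 4) none) = some n)
    (hg : PySem.List.pyGet? all (i + 1) = some nxt)
    (hv : PySem.Int.ofStrBase? nxt 16 = some v) :
    parseAGo all ((i, op) :: rest) pc false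
      = (pc, op, n + 1, some v) :: parseAGo all rest (pc + (n + 1)) true := by
  simp at h; simp [parseAGo, h, hn, hg, hv]

theorem recsB_push (op nxt : String) (rest : List String) (n v : Int)
    (h : PySem.Str.startswith op "PUSH" = true)
    (hn : PySem.Int.ofStr? (PySem.Str.slice op (some 4) none) = some n)
    (hv : PySem.Int.ofStrBase? nxt 16 = some v) :
    recsB (op :: nxt :: rest) = (op, n + 1, some v) :: recsB rest := by
  simp at h; simp [recsB, h, hn, hv]

theorem recsB_nonpush (op nxt : String) (rest : List String)
    (h : PySem.Str.startswith op "PUSH" = false) :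
    recsB (op :: nxt :: rest) = (op, 1, none) :: recsB (nxt :: rest) := by
  simp at h; simp [recsB, h]

set_option maxHeartbeats 1000000 in
theorem parseAGo_eq_annotate (all : List String) :
    ∀ (ts : List String) (k : Nat), all.drop k = ts → okTokens ts = true →
    ∀ pc : Int, parseAGo all (PySem.List.enumerate ts (k : Int)) pc false = annotate pc (recsB ts) := by
  intro ts
  induction ts using recsB.induct with
  | case1 => intro k _ _ pc; simp [PySem.List.enumerate_nil, parseAGo, recsB, annotate]
  | case2 op hpush =>
    -- a lone PUSH token raises in Python: excluded by okTokens
    intro k _ hok pc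
    simp [okTokens] at hok
    simp at hpush
    simp [hpush] at hok
  | case3 op hpush =>
    intro k _ _ pc
    have hp : PySem.Str.startswith op "PUSH" = false := by
      simpa using hpush
    have hpC := hp; simp at hpC
    rw [PySem.List.enumerate_cons, parseAGo_nonpush all _ op _ pc hp]
    simp [PySem.List.enumerate_nil, parseAGo, recsB, annotate, hpC]
  | case4 op nxt rest hpush n v hv hn ih =>
    intro k hdrop hok pc
    have hd1 : all.drop (k + 1) = nxt :: rest := drop_cons_tail all k op _ hdrop
    have hdrop' : all.drop (k + 2) = rest := drop_cons_tail all (k + 1) nxt _ hd1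
    have hpC := hpush; simp at hpC
    have hok' : okTokens rest = true := by
      simp [okTokens, hpC] at hok; exact hok.2
    have hget : PySem.List.pyGet? all ((k : Int) + 1) = some nxt := by
      have hc : ((k : Int) + 1) = ((k + 1 : Nat) : Int) := by push_cast; ring
      rw [hc, PySem.List.pyGet?_natCast]
      have h0 : (all.drop (k + 1))[0]? = all[(k + 1) + 0]? := List.getElem?_drop
      simp [hd1] at h0
      simpa using h0.symm
    have hrec := ih (k + 2) hdrop' hok' (pc + (n + 1))
    rw [PySem.List.enumerate_cons, PySem.List.enumerate_cons,
      parseAGo_push all _ op _ pc n nxt v hpush hn hget hv,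
      parseAGo_ignore,
      show ((k : Int) + 1 + 1) = ((k + 2 : Nat) : Int) by push_cast; ring,
      hrec,
      recsB_push op nxt rest n v hpush hn hv, annotate]
  | case5 op nxt rest hpush himp =>
    -- a failed int(op[4:]) or int(nxt, 16) raises in Python: excluded by okTokens
    intro k _ hok pc
    have hpC := hpush; simp at hpC
    simp [okTokens, hpC, Option.isSome_iff_exists] at hok
    obtain ⟨⟨⟨a, ha⟩, ⟨b, hb⟩⟩, _⟩ := hok
    exact (himp a b ha hb).elim
  | case6 op nxt rest hpush ih =>
    intro k hdrop hok pc
    have hp : PySem.Str.startswith op "PUSH" = false := by simpa using hpush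
    have hpC := hp; simp at hpC
    have hok' : okTokens (nxt :: rest) = true := by
      simpa [okTokens, hpC] using hok
    have hdrop' : all.drop (k + 1) = nxt :: rest := drop_cons_tail all k op _ hdrop
    have hrec := ih (k + 1) hdrop' hok' (pc + 1)
    rw [PySem.List.enumerate_cons, parseAGo_nonpush all _ op _ pc hp,
      show ((k : Int) + 1) = ((k + 1 : Nat) : Int) by push_cast; ring,
      hrec,
      recsB_nonpush op nxt rest hp, annotate]

-- the exact prefix-sum list pass 2 builds
def prefixSums (pc : Int) : List (String × Int × Option Int) → List Int
  | [] => [pc]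
  | r :: rs => pc :: prefixSums (pc + r.2.1) rs

theorem pyGet_last (acc : List Int) (pc : Int) :
    PySem.List.pyGet? (acc ++ [pc]) (-1) = some pc := by
  simp [PySem.List.pyGet?, PySem.List.pyIdx?]

theorem pcsB_fold_eq (recs : List (String × Int × Option Int)) :
    ∀ (acc : List Int) (pc : Int),
    recs.foldl (fun pcs r => pcs ++ [(PySem.List.pyGet? pcs (-1)).getD 0 + r.2.1]) (acc ++ [pc])
      = acc ++ prefixSums pc recs := by
  induction recs with
  | nil => intro acc pc; simp [prefixSums]
  | cons r rs ih =>
    intro acc pc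
    simp only [List.foldl_cons, pyGet_last, Option.getD_some, prefixSums]
    have := ih (acc ++ [pc]) (pc + r.2.1)
    simpa using this

theorem zip_prefixSums (recs : List (String × Int × Option Int)) :
    ∀ pc : Int,
    ((prefixSums pc recs).zip recs).map (fun p => (p.1, p.2.1, p.2.2.1, p.2.2.2))
      = annotate pc recs := by
  induction recs with
  | nil => intro pc; simp [prefixSums, annotate]
  | cons r rs ih =>
    intro pc
    obtain ⟨op, size, arg⟩ := r
    simp [prefixSums, annotate, ih]

theorem alt_eq_annotate (ts : List String) :
    ((pcsB (recsB ts)).zip (recsB ts)).map (fun p => (p.1, p.2.1, p.2.2.1, p.2.2.2))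
      = annotate 0 (recsB ts) := by
  have h : pcsB (recsB ts) = prefixSums 0 (recsB ts) := by
    have := pcsB_fold_eq (recsB ts) [] 0
    simpa [pcsB] using this
  rw [h, zip_prefixSums]

-- ===== VERDICT (by name: the statement is the Claim_ definition above) =====
theorem parse_opcodes_py_spec : Claim_equal_parse_opcodes_py := by
  intro opcodes _ hpre
  unfold Spec_parse_opcodes_py parse_opcodes_py parse_opcodes_py_alt
  rw [alt_eq_annotate]
  exact parseAGo_eq_annotate _ _ 0 rfl hpre 0
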